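-- pv_equiv track=rewrite | github.com/qiufengyuyi/lear_ner_extraction | data_processing/lear_processor.py | find_tag_start_end_index
-- ===== SOURCE A (Python) =====
-- def find_tag_start_end_index(tag_list, label_list):
--     # 输出[[1,0,0],[0,1,0],[0,0,1]]
--     start_label_list = []
--     end_label_list = []
--     # start_tag = "B-"+tag
--     # end_tag = "I-"+tag
--     for i in range(len(label_list)):
--         cur_start_tags = [0] * len(tag_list)
--         cur_end_tags = [0] * len(tag_list)
--         for index, tag in enumerate(tag_list):
--             start_tag = "B-" + tag
--             end_tag = "I-" + tag
--             if label_list[i].upper() == start_tag: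
--                 # begin
--                 cur_start_tags[index] = 1
--             elif label_list[i].upper() == end_tag:
--                 if i == len(label_list) - 1:
--                     # last tag
--                     cur_end_tags[index] = 1
--                 else:
--                     if label_list[i + 1].upper() != end_tag:
--                         cur_end_tags[index] = 1
--         assert sum(cur_start_tags) < 2
--         assert sum(cur_end_tags) < 2
--         start_label_list.append(cur_start_tags)
--         end_label_list.append(cur_end_tags)
--     return start_label_list, end_label_list
-- ===== SOURCE B (Python) =====
-- def find_tag_start_end_index(tag_list, label_list):
--     # index the tag list once: tag -> all positions (a list, so duplicate tags keep working)
--     positions = {}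
--     for idx, tag in enumerate(tag_list):
--         positions.setdefault(tag, []).append(idx)
--     n = len(tag_list)
--     uppers = [lab.upper() for lab in label_list]
--     start_label_list = []
--     end_label_list = []
--     for lab, nxt in zip(uppers, uppers[1:] + [None]):
--         cur_start_tags = [0] * n
--         cur_end_tags = [0] * n
--         if lab.startswith("B-"):
--             for idx in positions.get(lab[2:], []):
--                 cur_start_tags[idx] = 1
--         elif lab.startswith("I-") and nxt != lab:
--             for idx in positions.get(lab[2:], []):
--                 cur_end_tags[idx] = 1
--         assert sum(cur_start_tags) < 2
--         assert sum(cur_end_tags) < 2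
--         start_label_list.append(cur_start_tags)
--         end_label_list.append(cur_end_tags)
--     return start_label_list, end_label_list
-- ===== Notes on version B (the rewrite author's own statement) =====
-- stated objective: faster
-- what changed: Instead of rescanning tag_list for every label and rebuilding 'B-'+tag/'I-'+tag strings, B builds a tag->positions dict once, precomputes the uppercased labels, and per label strips the 'B-'/'I-' prefix and looks the remainder up in the dict, pairing each label with its successor via zip instead of index arithmetic.
import Mathlib
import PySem

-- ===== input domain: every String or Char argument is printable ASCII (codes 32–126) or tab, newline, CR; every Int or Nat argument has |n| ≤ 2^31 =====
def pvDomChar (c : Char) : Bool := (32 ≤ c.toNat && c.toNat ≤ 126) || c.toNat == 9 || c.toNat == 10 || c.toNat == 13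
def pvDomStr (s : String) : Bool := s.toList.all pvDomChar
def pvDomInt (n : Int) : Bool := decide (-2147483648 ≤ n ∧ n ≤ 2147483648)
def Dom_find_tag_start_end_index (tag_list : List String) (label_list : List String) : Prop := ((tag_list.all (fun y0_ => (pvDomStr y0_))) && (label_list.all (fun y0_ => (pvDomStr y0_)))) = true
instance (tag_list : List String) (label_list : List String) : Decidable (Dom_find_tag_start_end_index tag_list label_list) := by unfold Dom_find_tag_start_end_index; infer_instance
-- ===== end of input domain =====

-- B replaces A's per-label inner scan of tag_list by a tag→positions dict built once plus prefix-strip lookup (data-structure change; return value only — neither version mutates its arguments).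
-- Ports: string concatenation/equality are ported on code points (List Char), exact; enumerate indices are ≥ 0, so .toNat is exact;
-- the Python 'assert sum(...) < 2' raises (AssertionError) are exactly the inputs excluded by Pre_ below, so the ports carry no assert.

-- ===== PORT A =====
def find_tag_start_end_index (tag_list : List String) (label_list : List String) :
    List (List Int) × List (List Int) :=
  -- for i in range(len(label_list)): build cur_start_tags/cur_end_tags by scanning enumerate(tag_list)
  (List.range label_list.length).foldl
    (fun (acc : List (List Int) × List (List Int)) i =>
      let cur := (PySem.List.enumerate tag_list).foldl
        (fun (cur : List Int × List Int) it =>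
          let start_tag := 'B' :: '-' :: it.2.toList        -- "B-" + tag
          let end_tag := 'I' :: '-' :: it.2.toList          -- "I-" + tag
          if PySem.Chars.upper (label_list.getD i "").toList = start_tag then
            (cur.1.set it.1.toNat 1, cur.2)
          else if PySem.Chars.upper (label_list.getD i "").toList = end_tag then
            if i = label_list.length - 1 then (cur.1, cur.2.set it.1.toNat 1)
            else if PySem.Chars.upper (label_list.getD (i + 1) "").toList ≠ end_tag then
              (cur.1, cur.2.set it.1.toNat 1)
            else cur
          else cur)
        (List.replicate tag_list.length 0, List.replicate tag_list.length 0)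
      (acc.1 ++ [cur.1], acc.2 ++ [cur.2]))
    ([], [])

-- ===== PORT B =====
def find_tag_start_end_index_alt (tag_list : List String) (label_list : List String) :
    List (List Int) × List (List Int) :=
  -- positions: tag -> list of its indices (setdefault(tag, []).append(idx) = modify tag [] (· ++ [idx]))
  let positions : PySem.Dict (List Char) (List Nat) :=
    (PySem.List.enumerate tag_list).foldl
      (fun d it => d.modify it.2.toList [] (· ++ [it.1.toNat])) PySem.Dict.empty
  let n := tag_list.length
  let uppers := label_list.map (fun lab => PySem.Chars.upper lab.toList)
  -- for lab, nxt in zip(uppers, uppers[1:] + [None]):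
  (uppers.zip ((PySem.List.slice uppers (some 1) none).map some ++ [none])).foldl
    (fun (acc : List (List Int) × List (List Int)) p =>
      let cur_start := List.replicate n (0 : Int)
      let cur_end := List.replicate n (0 : Int)
      let rows :=
        if PySem.Chars.startswith p.1 ['B', '-'] then
          ((positions.getD (PySem.List.slice p.1 (some 2) none) []).foldl
              (fun cs idx => cs.set idx 1) cur_start, cur_end)
        else if PySem.Chars.startswith p.1 ['I', '-'] && (p.2 != some p.1) then
          (cur_start,
           (positions.getD (PySem.List.slice p.1 (some 2) none) []).foldl
              (fun cs idx => cs.set idx 1) cur_end)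
        else (cur_start, cur_end)
      (acc.1 ++ [rows.1], acc.2 ++ [rows.2]))
    ([], [])

-- ===== PRECONDITION & SPEC =====
-- Pre_ excludes exactly the inputs on which Python A raises AssertionError ('assert sum(...) < 2'):
-- some label matches "B-"+tag (resp. "I-"+tag) for two or more entries of tag_list (duplicate matching tags).
-- Python B raises there too; on every input admitted by Pre_, A returns normally.
def Pre_find_tag_start_end_index (tag_list : List String) (label_list : List String) : Prop :=
  ∀ lab ∈ label_list,
    List.countP (fun t => decide (PySem.Chars.upper lab.toList = 'B' :: '-' :: t.toList)) tag_list ≤ 1 ∧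
    List.countP (fun t => decide (PySem.Chars.upper lab.toList = 'I' :: '-' :: t.toList)) tag_list ≤ 1
instance (tag_list : List String) (label_list : List String) : Decidable (Pre_find_tag_start_end_index tag_list label_list) := by
  unfold Pre_find_tag_start_end_index; infer_instance

def pvWitness_find_tag_start_end_index : List String × List String :=
  (["PER", "LOC"], ["B-PER", "I-PER", "O", "B-LOC"])

def Spec_find_tag_start_end_index (tag_list : List String) (label_list : List String)
    (out : List (List Int) × List (List Int)) : Prop :=
  out = find_tag_start_end_index_alt tag_list label_list
instance (tag_list : List String) (label_list : List String) (out : List (List Int) × List (List Int)) :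
    Decidable (Spec_find_tag_start_end_index tag_list label_list out) := by
  unfold Spec_find_tag_start_end_index; infer_instance

-- ===== CLAIM (what is proved, stated in full; the proofs are below) =====
def Claim_equal_find_tag_start_end_index : Prop := ∀ (tag_list : List String) (label_list : List String), Dom_find_tag_start_end_index tag_list label_list → Pre_find_tag_start_end_index tag_list label_list → Spec_find_tag_start_end_index tag_list label_list (find_tag_start_end_index tag_list label_list)

-- ===== LEMMAS AND PROOFS =====

-- the uppercased i-th label and the option-valued "next uppercased label" (none at the last position)
def pvLabU (label_list : List String) (i : Nat) : List Char :=
  PySem.Chars.upper (label_list.getD i "").toList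
def pvNxt (label_list : List String) (i : Nat) : Option (List Char) :=
  if i = label_list.length - 1 then none else some (pvLabU label_list (i + 1))

-- the start/end rows both programs produce for one label
def pvSrow (tag_list : List String) (lab : List Char) : List Int :=
  tag_list.map (fun t => if lab = 'B' :: '-' :: t.toList then (1 : Int) else 0)
def pvErow (tag_list : List String) (lab : List Char) (nxt : Option (List Char)) : List Int :=
  tag_list.map (fun t => if lab = 'I' :: '-' :: t.toList ∧ nxt ≠ some lab then (1 : Int) else 0)

lemma pvFoldl_pair_append {α β : Type} (l : List α) (f g : α → β) : ∀ acc : List β × List β,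
    l.foldl (fun acc x => (acc.1 ++ [f x], acc.2 ++ [g x])) acc = (acc.1 ++ l.map f, acc.2 ++ l.map g) := by
  induction l with
  | nil => intro acc; simp
  | cons x l ih => intro acc; simp [ih]

lemma pvFoldl_pair_append_nil {α β : Type} (l : List α) (f g : α → β) :
    l.foldl (fun acc x => (acc.1 ++ [f x], acc.2 ++ [g x])) ([], []) = (l.map f, l.map g) := by
  rw [pvFoldl_pair_append]; simp

lemma pvGetElem?_foldl_set (J : List Nat) : ∀ (cs : List Int) (j : Nat),
    (J.foldl (fun cs i => cs.set i 1) cs)[j]? =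
      if j ∈ J then cs[j]?.map (fun _ => (1 : Int)) else cs[j]? := by
  induction J with
  | nil => intro cs j; simp
  | cons a J ih =>
    intro cs j
    rw [List.foldl_cons, ih (cs.set a 1) j]
    by_cases haj : a = j
    · subst haj
      by_cases hl : a < cs.length
      · simp [hl, List.getElem?_eq_getElem hl]
      · simp [hl, List.getElem?_eq_none (Nat.le_of_not_lt hl)]
    · simp [haj, List.mem_cons, Ne.symm haj]

lemma pvSetFold_replicate (tag_list : List String) (q : String → Prop) [DecidablePred q] (J : List Nat)
    (h : ∀ j : Nat, j ∈ J ↔ ∃ hj : j < tag_list.length, q tag_list[j]) :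
    J.foldl (fun cs i => cs.set i 1) (List.replicate tag_list.length (0 : Int)) =
      tag_list.map (fun t => if q t then (1 : Int) else 0) := by
  apply List.ext_getElem?
  intro j
  rw [pvGetElem?_foldl_set]
  by_cases hj : j < tag_list.length
  · by_cases hq : q tag_list[j]
    · have hmem : j ∈ J := (h j).2 ⟨hj, hq⟩
      simp [hmem, hj, hq]
    · have hmem : j ∉ J := fun hm => hq ((h j).1 hm).2
      simp [hmem, hj, hq]
  · have hmem : j ∉ J := fun hm => hj ((h j).1 hm).1
    have h1 : (List.replicate tag_list.length (0:Int))[j]? = none := by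
      simp; omega
    have h2 : (tag_list.map (fun t => if q t then (1:Int) else 0))[j]? = none := by
      simp; omega
    simp [hmem, h1, h2]

lemma pvMem_enum_filter_map (tag_list : List String) (p : Int × String → Bool) (j : Nat) :
    j ∈ ((PySem.List.enumerate tag_list).filter p).map (fun it => it.1.toNat) ↔
      ∃ hj : j < tag_list.length, p ((j : Int), tag_list[j]) = true := by
  simp only [List.mem_map, List.mem_filter, PySem.List.mem_enumerate_iff]
  constructor
  · rintro ⟨it, ⟨⟨k, hk, rfl⟩, hp⟩, hj⟩
    simp only [zero_add, Int.toNat_natCast] at hj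
    subst hj
    exact ⟨hk, by simpa using hp⟩
  · rintro ⟨hj, hp⟩
    exact ⟨((j : Int), tag_list[j]), ⟨⟨j, hj, by simp⟩, hp⟩, by simp⟩

lemma pvPositions_getD (tag_list : List String) (key : List Char) :
    ((PySem.List.enumerate tag_list).foldl
        (fun d it => d.modify it.2.toList [] (· ++ [it.1.toNat])) PySem.Dict.empty).getD key []
      = ((PySem.List.enumerate tag_list).filter (fun it => it.2.toList == key)).map (fun it => it.1.toNat) := by
  have h1 : (PySem.List.enumerate tag_list).foldl
        (fun d it => d.modify it.2.toList [] (· ++ [it.1.toNat])) PySem.Dict.empty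
      = ((PySem.List.enumerate tag_list).map (fun it => (it.2.toList, it.1.toNat))).foldl
          (fun d p => d.modify p.1 [] (· ++ [p.2])) PySem.Dict.empty := by
    rw [List.foldl_map]
  rw [h1, PySem.Dict.getD_foldl_modify_append, PySem.Dict.getD_empty]
  rw [List.filter_map, List.map_map]
  rfl

-- zeros rows
lemma pvSrow_zero (tag_list : List String) (lab : List Char)
    (h : ∀ t : String, lab ≠ 'B' :: '-' :: t.toList) :
    pvSrow tag_list lab = List.replicate tag_list.length 0 := by
  unfold pvSrow
  calc tag_list.map (fun t => if lab = 'B' :: '-' :: t.toList then (1 : Int) else 0)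
      = tag_list.map (fun _ => (0 : Int)) := List.map_congr_left (fun t _ => by simp [h t])
    _ = _ := List.map_const'

lemma pvErow_zero (tag_list : List String) (lab : List Char) (nxt : Option (List Char))
    (h : ∀ t : String, ¬ (lab = 'I' :: '-' :: t.toList ∧ nxt ≠ some lab)) :
    pvErow tag_list lab nxt = List.replicate tag_list.length 0 := by
  unfold pvErow
  calc tag_list.map (fun t => if lab = 'I' :: '-' :: t.toList ∧ nxt ≠ some lab then (1 : Int) else 0)
      = tag_list.map (fun _ => (0 : Int)) := List.map_congr_left (fun t _ => by simp [h t])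
    _ = _ := List.map_const'

-- one inner scan with an 'if P then set else skip' body is the indicator map
lemma pvEnumFold_if_set (tag_list : List String) (P : String → Prop) [DecidablePred P] :
    (PySem.List.enumerate tag_list).foldl
        (fun (cs : List Int) (it : Int × String) => if P it.2 then cs.set it.1.toNat 1 else cs)
        (List.replicate tag_list.length (0 : Int))
      = tag_list.map (fun t => if P t then (1 : Int) else 0) := by
  have h1 : (fun (cs : List Int) (it : Int × String) => if P it.2 then cs.set it.1.toNat 1 else cs)
      = (fun (cs : List Int) (it : Int × String) =>
          if (fun (it : Int × String) => decide (P it.2)) it = true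
          then (fun (cs : List Int) (it : Int × String) => cs.set it.1.toNat 1) cs it else cs) := by
    funext cs it; simp
  rw [h1, ← List.foldl_filter,
      ← List.foldl_map (f := fun (it : Int × String) => it.1.toNat) (g := fun (cs : List Int) j => cs.set j 1)]
  exact pvSetFold_replicate tag_list P _
    (fun j => by simpa using pvMem_enum_filter_map tag_list (fun it => decide (P it.2)) j)

-- A's inner scan produces exactly the two indicator rows
lemma pvA_inner (tag_list label_list : List String) (i : Nat) :
    (PySem.List.enumerate tag_list).foldl
        (fun (cur : List Int × List Int) it =>
          let start_tag := 'B' :: '-' :: it.2.toList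
          let end_tag := 'I' :: '-' :: it.2.toList
          if PySem.Chars.upper (label_list.getD i "").toList = start_tag then
            (cur.1.set it.1.toNat 1, cur.2)
          else if PySem.Chars.upper (label_list.getD i "").toList = end_tag then
            if i = label_list.length - 1 then (cur.1, cur.2.set it.1.toNat 1)
            else if PySem.Chars.upper (label_list.getD (i + 1) "").toList ≠ end_tag then
              (cur.1, cur.2.set it.1.toNat 1)
            else cur
          else cur)
        (List.replicate tag_list.length 0, List.replicate tag_list.length 0)
      = (pvSrow tag_list (pvLabU label_list i),
         pvErow tag_list (pvLabU label_list i) (pvNxt label_list i)) := by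
  have step_eq : (fun (cur : List Int × List Int) it =>
          let start_tag := 'B' :: '-' :: it.2.toList
          let end_tag := 'I' :: '-' :: it.2.toList
          if PySem.Chars.upper (label_list.getD i "").toList = start_tag then
            (cur.1.set it.1.toNat 1, cur.2)
          else if PySem.Chars.upper (label_list.getD i "").toList = end_tag then
            if i = label_list.length - 1 then (cur.1, cur.2.set it.1.toNat 1)
            else if PySem.Chars.upper (label_list.getD (i + 1) "").toList ≠ end_tag then
              (cur.1, cur.2.set it.1.toNat 1)
            else cur
          else cur)
      = (fun (cur : List Int × List Int) (it : Int × String) =>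
          ((fun (cs : List Int) (it : Int × String) =>
              if pvLabU label_list i = 'B' :: '-' :: it.2.toList then cs.set it.1.toNat 1 else cs) cur.1 it,
           (fun (cs : List Int) (it : Int × String) =>
              if pvLabU label_list i = 'I' :: '-' :: it.2.toList ∧ pvNxt label_list i ≠ some (pvLabU label_list i)
              then cs.set it.1.toNat 1 else cs) cur.2 it)) := by
    funext cur it
    show (if PySem.Chars.upper (label_list.getD i "").toList = 'B' :: '-' :: it.2.toList then
            (cur.1.set it.1.toNat 1, cur.2)
          else if PySem.Chars.upper (label_list.getD i "").toList = 'I' :: '-' :: it.2.toList then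
            if i = label_list.length - 1 then (cur.1, cur.2.set it.1.toNat 1)
            else if PySem.Chars.upper (label_list.getD (i + 1) "").toList ≠ 'I' :: '-' :: it.2.toList then
              (cur.1, cur.2.set it.1.toNat 1)
            else cur
          else cur) = _
    simp only [pvLabU, pvNxt]
    split_ifs <;> first | rfl | simp_all
  rw [step_eq, PySem.List.foldl_prod_mk
      (fun (cs : List Int) (it : Int × String) =>
        if pvLabU label_list i = 'B' :: '-' :: it.2.toList then cs.set it.1.toNat 1 else cs)
      (fun (cs : List Int) (it : Int × String) =>
        if pvLabU label_list i = 'I' :: '-' :: it.2.toList ∧ pvNxt label_list i ≠ some (pvLabU label_list i)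
        then cs.set it.1.toNat 1 else cs)]
  exact congrArg₂ Prod.mk
    (pvEnumFold_if_set tag_list (fun t => pvLabU label_list i = 'B' :: '-' :: t.toList))
    (pvEnumFold_if_set tag_list
      (fun t => pvLabU label_list i = 'I' :: '-' :: t.toList ∧ pvNxt label_list i ≠ some (pvLabU label_list i)))

-- B's dict-lookup rows are the same indicator rows
lemma pvB_start_row (tag_list : List String) (lab : List Char)
    (h : PySem.Chars.startswith lab ['B', '-'] = true) :
    (((PySem.List.enumerate tag_list).foldl
        (fun d it => d.modify it.2.toList [] (· ++ [it.1.toNat])) PySem.Dict.empty).getD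
          (PySem.List.slice lab (some 2) none) []).foldl (fun cs idx => cs.set idx 1)
        (List.replicate tag_list.length (0 : Int)) = pvSrow tag_list lab := by
  obtain ⟨rest, hrest⟩ := (PySem.Chars.startswith_iff lab ['B', '-']).1 h
  have hlab : lab = 'B' :: '-' :: rest := hrest.symm
  subst hlab
  have hslice : PySem.List.slice ('B' :: '-' :: rest) (some 2) none = rest := by
    rw [PySem.List.slice_from _ (by norm_num : (0:Int) ≤ 2)]; rfl
  rw [pvPositions_getD, hslice]
  exact pvSetFold_replicate tag_list (fun t => 'B' :: '-' :: rest = 'B' :: '-' :: t.toList) _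
    (fun j => by
      rw [pvMem_enum_filter_map tag_list (fun it => it.2.toList == rest) j]
      refine exists_congr fun hj => ?_
      dsimp only
      rw [beq_iff_eq]
      exact ⟨fun hp => by rw [hp], fun hp => by
        injection hp with h1 h2; injection h2 with h3 h4; exact h4.symm⟩)

lemma pvB_end_row (tag_list : List String) (lab : List Char) (nxt : Option (List Char))
    (h : PySem.Chars.startswith lab ['I', '-'] = true) (hn : nxt ≠ some lab) :
    (((PySem.List.enumerate tag_list).foldl
        (fun d it => d.modify it.2.toList [] (· ++ [it.1.toNat])) PySem.Dict.empty).getD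
          (PySem.List.slice lab (some 2) none) []).foldl (fun cs idx => cs.set idx 1)
        (List.replicate tag_list.length (0 : Int)) = pvErow tag_list lab nxt := by
  obtain ⟨rest, hrest⟩ := (PySem.Chars.startswith_iff lab ['I', '-']).1 h
  have hlab : lab = 'I' :: '-' :: rest := hrest.symm
  subst hlab
  have hslice : PySem.List.slice ('I' :: '-' :: rest) (some 2) none = rest := by
    rw [PySem.List.slice_from _ (by norm_num : (0:Int) ≤ 2)]; rfl
  rw [pvPositions_getD, hslice]
  exact pvSetFold_replicate tag_list
    (fun t => 'I' :: '-' :: rest = 'I' :: '-' :: t.toList ∧ nxt ≠ some ('I' :: '-' :: rest)) _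
    (fun j => by
      rw [pvMem_enum_filter_map tag_list (fun it => it.2.toList == rest) j]
      refine exists_congr fun hj => ?_
      dsimp only
      rw [beq_iff_eq]
      exact ⟨fun hp => ⟨by rw [hp], hn⟩, fun hp => by
        obtain ⟨hp, -⟩ := hp
        injection hp with h1 h2; injection h2 with h3 h4; exact h4.symm⟩)

-- the branch structure of B's loop body produces exactly the indicator rows
lemma pvRowsPair (tag_list : List String) (lab : List Char) (nxt : Option (List Char)) :
    (if PySem.Chars.startswith lab ['B', '-'] then
        ((((PySem.List.enumerate tag_list).foldl
            (fun d it => d.modify it.2.toList [] (· ++ [it.1.toNat])) PySem.Dict.empty).getD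
              (PySem.List.slice lab (some 2) none) []).foldl (fun cs idx => cs.set idx 1)
            (List.replicate tag_list.length (0 : Int)),
         List.replicate tag_list.length (0 : Int))
      else if PySem.Chars.startswith lab ['I', '-'] && (nxt != some lab) then
        (List.replicate tag_list.length (0 : Int),
         (((PySem.List.enumerate tag_list).foldl
            (fun d it => d.modify it.2.toList [] (· ++ [it.1.toNat])) PySem.Dict.empty).getD
              (PySem.List.slice lab (some 2) none) []).foldl (fun cs idx => cs.set idx 1)
            (List.replicate tag_list.length (0 : Int)))
      else (List.replicate tag_list.length (0 : Int), List.replicate tag_list.length (0 : Int)))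
    = (pvSrow tag_list lab, pvErow tag_list lab nxt) := by
  by_cases hB : PySem.Chars.startswith lab ['B', '-'] = true
  · obtain ⟨rest, hrest⟩ := (PySem.Chars.startswith_iff lab ['B', '-']).1 hB
    rw [if_pos hB, pvB_start_row tag_list lab hB,
        pvErow_zero tag_list lab nxt (by rintro t ⟨ht, -⟩; rw [← hrest] at ht; simp at ht)]
  · rw [if_neg hB]
    have hSz : pvSrow tag_list lab = List.replicate tag_list.length 0 := by
      refine pvSrow_zero tag_list lab (fun t ht => hB ?_)
      rw [PySem.Chars.startswith_iff, ht]
      exact ⟨t.toList, rfl⟩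
    by_cases hI : (PySem.Chars.startswith lab ['I', '-'] && (nxt != some lab)) = true
    · rw [Bool.and_eq_true] at hI
      obtain ⟨hI1, hI2'⟩ := hI
      have hI2 : nxt ≠ some lab := by simpa using hI2'
      have hI : (PySem.Chars.startswith lab ['I', '-'] && (nxt != some lab)) = true := by
        rw [Bool.and_eq_true]; exact ⟨hI1, hI2'⟩
      rw [if_pos hI, pvB_end_row tag_list lab nxt hI1 hI2, hSz]
    · rw [if_neg hI, hSz]
      have hEz : pvErow tag_list lab nxt = List.replicate tag_list.length 0 := by
        refine pvErow_zero tag_list lab nxt ?_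
        rintro t ⟨ht, hnx⟩
        apply hI
        rw [Bool.and_eq_true]
        refine ⟨by rw [PySem.Chars.startswith_iff, ht]; exact ⟨t.toList, rfl⟩, by simpa using hnx⟩
      rw [hEz]

-- reindexing: mapping over zip(uppers, uppers[1:] + [None]) = mapping over range(len)
lemma pvZipNext_map {γ : Type} (F : List Char × Option (List Char) → γ) :
    ∀ us : List (List Char),
      (us.zip ((us.drop 1).map some ++ [none])).map F
        = (List.range us.length).map
            (fun i => F (us.getD i [], if i = us.length - 1 then none else some (us.getD (i + 1) []))) := by
  intro us
  induction us with
  | nil => rfl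
  | cons u rest ih =>
    cases rest with
    | nil => rfl
    | cons r rs =>
      have hzip : ((u :: r :: rs).zip (((u :: r :: rs).drop 1).map some ++ [none])).map F
          = F (u, some r) :: ((r :: rs).zip (((r :: rs).drop 1).map some ++ [none])).map F := by
        simp [List.zip_cons_cons]
      rw [hzip, ih]
      have hlen : (u :: r :: rs).length = (r :: rs).length + 1 := rfl
      rw [hlen, List.range_succ_eq_map, List.map_cons, List.map_map]
      refine List.cons_eq_cons.mpr ⟨?_, ?_⟩
      · have h0 : ¬ ((0 : Nat) = (r :: rs).length + 1 - 1) := by simp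
        rw [if_neg h0]
        rfl
      · refine List.map_congr_left ?_
        intro j hj
        simp only [Function.comp_apply, List.getD_cons_succ, List.length_cons, Nat.add_sub_cancel]
        have hcond : (j + 1 = rs.length + 1) ↔ (j = rs.length) := by omega
        rw [if_congr hcond rfl rfl]

-- getting an element of the uppercased label list
lemma pvUppers_getD (label_list : List String) (i : Nat) (hi : i < label_list.length) :
    (label_list.map (fun lab => PySem.Chars.upper lab.toList)).getD i [] = pvLabU label_list i := by
  rw [List.getD_eq_getElem _ _ (by simpa using hi), List.getElem_map]
  unfold pvLabU
  rw [List.getD_eq_getElem _ _ hi]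

lemma pvA_eq (tag_list label_list : List String) :
    find_tag_start_end_index tag_list label_list =
      ((List.range label_list.length).map (fun i => pvSrow tag_list (pvLabU label_list i)),
       (List.range label_list.length).map
         (fun i => pvErow tag_list (pvLabU label_list i) (pvNxt label_list i))) := by
  unfold find_tag_start_end_index
  refine Eq.trans (pvFoldl_pair_append_nil (List.range label_list.length)
      (fun i => ((PySem.List.enumerate tag_list).foldl
        (fun (cur : List Int × List Int) it =>
          let start_tag := 'B' :: '-' :: it.2.toList
          let end_tag := 'I' :: '-' :: it.2.toList
          if PySem.Chars.upper (label_list.getD i "").toList = start_tag then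
            (cur.1.set it.1.toNat 1, cur.2)
          else if PySem.Chars.upper (label_list.getD i "").toList = end_tag then
            if i = label_list.length - 1 then (cur.1, cur.2.set it.1.toNat 1)
            else if PySem.Chars.upper (label_list.getD (i + 1) "").toList ≠ end_tag then
              (cur.1, cur.2.set it.1.toNat 1)
            else cur
          else cur)
        (List.replicate tag_list.length 0, List.replicate tag_list.length 0)).1)
      (fun i => ((PySem.List.enumerate tag_list).foldl
        (fun (cur : List Int × List Int) it =>
          let start_tag := 'B' :: '-' :: it.2.toList
          let end_tag := 'I' :: '-' :: it.2.toList
          if PySem.Chars.upper (label_list.getD i "").toList = start_tag then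
            (cur.1.set it.1.toNat 1, cur.2)
          else if PySem.Chars.upper (label_list.getD i "").toList = end_tag then
            if i = label_list.length - 1 then (cur.1, cur.2.set it.1.toNat 1)
            else if PySem.Chars.upper (label_list.getD (i + 1) "").toList ≠ end_tag then
              (cur.1, cur.2.set it.1.toNat 1)
            else cur
          else cur)
        (List.replicate tag_list.length 0, List.replicate tag_list.length 0)).2)) ?_
  rw [Prod.mk.injEq]
  exact ⟨List.map_congr_left fun i _ => congrArg Prod.fst (pvA_inner tag_list label_list i),
         List.map_congr_left fun i _ => congrArg Prod.snd (pvA_inner tag_list label_list i)⟩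

lemma pvB_eq (tag_list label_list : List String) :
    find_tag_start_end_index_alt tag_list label_list =
      ((List.range label_list.length).map (fun i => pvSrow tag_list (pvLabU label_list i)),
       (List.range label_list.length).map
         (fun i => pvErow tag_list (pvLabU label_list i) (pvNxt label_list i))) := by
  unfold find_tag_start_end_index_alt
  refine Eq.trans (pvFoldl_pair_append_nil
      ((label_list.map (fun lab => PySem.Chars.upper lab.toList)).zip
        ((PySem.List.slice (label_list.map (fun lab => PySem.Chars.upper lab.toList)) (some 1) none).map some ++ [none]))
      (fun p => (if PySem.Chars.startswith p.1 ['B', '-'] then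
          ((((PySem.List.enumerate tag_list).foldl
              (fun d it => d.modify it.2.toList [] (· ++ [it.1.toNat])) PySem.Dict.empty).getD
                (PySem.List.slice p.1 (some 2) none) []).foldl (fun cs idx => cs.set idx 1)
              (List.replicate tag_list.length (0 : Int)),
           List.replicate tag_list.length (0 : Int))
        else if PySem.Chars.startswith p.1 ['I', '-'] && (p.2 != some p.1) then
          (List.replicate tag_list.length (0 : Int),
           (((PySem.List.enumerate tag_list).foldl
              (fun d it => d.modify it.2.toList [] (· ++ [it.1.toNat])) PySem.Dict.empty).getD
                (PySem.List.slice p.1 (some 2) none) []).foldl (fun cs idx => cs.set idx 1)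
              (List.replicate tag_list.length (0 : Int)))
        else (List.replicate tag_list.length (0 : Int), List.replicate tag_list.length (0 : Int))).1)
      (fun p => (if PySem.Chars.startswith p.1 ['B', '-'] then
          ((((PySem.List.enumerate tag_list).foldl
              (fun d it => d.modify it.2.toList [] (· ++ [it.1.toNat])) PySem.Dict.empty).getD
                (PySem.List.slice p.1 (some 2) none) []).foldl (fun cs idx => cs.set idx 1)
              (List.replicate tag_list.length (0 : Int)),
           List.replicate tag_list.length (0 : Int))
        else if PySem.Chars.startswith p.1 ['I', '-'] && (p.2 != some p.1) then
          (List.replicate tag_list.length (0 : Int),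
           (((PySem.List.enumerate tag_list).foldl
              (fun d it => d.modify it.2.toList [] (· ++ [it.1.toNat])) PySem.Dict.empty).getD
                (PySem.List.slice p.1 (some 2) none) []).foldl (fun cs idx => cs.set idx 1)
              (List.replicate tag_list.length (0 : Int)))
        else (List.replicate tag_list.length (0 : Int), List.replicate tag_list.length (0 : Int))).2)) ?_
  have hslice1 : PySem.List.slice (label_list.map (fun lab => PySem.Chars.upper lab.toList)) (some 1) none
      = (label_list.map (fun lab => PySem.Chars.upper lab.toList)).drop 1 := by
    rw [PySem.List.slice_from _ (by norm_num : (0:Int) ≤ 1)]; rfl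
  rw [hslice1,
      pvZipNext_map (F := fun p => (if PySem.Chars.startswith p.1 ['B', '-'] then
          ((((PySem.List.enumerate tag_list).foldl
              (fun d it => d.modify it.2.toList [] (· ++ [it.1.toNat])) PySem.Dict.empty).getD
                (PySem.List.slice p.1 (some 2) none) []).foldl (fun cs idx => cs.set idx 1)
              (List.replicate tag_list.length (0 : Int)),
           List.replicate tag_list.length (0 : Int))
        else if PySem.Chars.startswith p.1 ['I', '-'] && (p.2 != some p.1) then
          (List.replicate tag_list.length (0 : Int),
           (((PySem.List.enumerate tag_list).foldl
              (fun d it => d.modify it.2.toList [] (· ++ [it.1.toNat])) PySem.Dict.empty).getD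
                (PySem.List.slice p.1 (some 2) none) []).foldl (fun cs idx => cs.set idx 1)
              (List.replicate tag_list.length (0 : Int)))
        else (List.replicate tag_list.length (0 : Int), List.replicate tag_list.length (0 : Int))).1),
      pvZipNext_map (F := fun p => (if PySem.Chars.startswith p.1 ['B', '-'] then
          ((((PySem.List.enumerate tag_list).foldl
              (fun d it => d.modify it.2.toList [] (· ++ [it.1.toNat])) PySem.Dict.empty).getD
                (PySem.List.slice p.1 (some 2) none) []).foldl (fun cs idx => cs.set idx 1)
              (List.replicate tag_list.length (0 : Int)),
           List.replicate tag_list.length (0 : Int))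
        else if PySem.Chars.startswith p.1 ['I', '-'] && (p.2 != some p.1) then
          (List.replicate tag_list.length (0 : Int),
           (((PySem.List.enumerate tag_list).foldl
              (fun d it => d.modify it.2.toList [] (· ++ [it.1.toNat])) PySem.Dict.empty).getD
                (PySem.List.slice p.1 (some 2) none) []).foldl (fun cs idx => cs.set idx 1)
              (List.replicate tag_list.length (0 : Int)))
        else (List.replicate tag_list.length (0 : Int), List.replicate tag_list.length (0 : Int))).2)]
  simp only [List.length_map]
  rw [Prod.mk.injEq]
  constructor
  · apply List.map_congr_left
    intro i hi
    have hi' : i < label_list.length := List.mem_range.1 hi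
    rw [pvUppers_getD label_list i hi']
    by_cases hlast : i = label_list.length - 1
    · rw [if_pos hlast]
      exact congrArg Prod.fst (pvRowsPair tag_list (pvLabU label_list i) none)
    · rw [if_neg hlast, pvUppers_getD label_list (i + 1) (by omega)]
      exact congrArg Prod.fst (pvRowsPair tag_list (pvLabU label_list i)
        (some (pvLabU label_list (i + 1))))
  · apply List.map_congr_left
    intro i hi
    have hi' : i < label_list.length := List.mem_range.1 hi
    rw [pvUppers_getD label_list i hi']
    by_cases hlast : i = label_list.length - 1
    · rw [if_pos hlast, show pvNxt label_list i = none from if_pos hlast]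
      exact congrArg Prod.snd (pvRowsPair tag_list (pvLabU label_list i) none)
    · rw [if_neg hlast, pvUppers_getD label_list (i + 1) (by omega),
          show pvNxt label_list i = some (pvLabU label_list (i + 1)) from if_neg hlast]
      exact congrArg Prod.snd (pvRowsPair tag_list (pvLabU label_list i)
        (some (pvLabU label_list (i + 1))))

-- ===== VERDICT (by name: the statement is the Claim_ definition above) =====
theorem find_tag_start_end_index_spec : Claim_equal_find_tag_start_end_index := by
  intro tag_list label_list _ _
  unfold Spec_find_tag_start_end_index
  rw [pvA_eq, pvB_eq]
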